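-- pv_equiv track=rewrite | github.com/ProtKsen/Pythonboost | task 7/main.py | count_animals
-- ===== SOURCE A (Python) =====
-- from itertools import combinations_with_replacement
-- from collections import Counter
--
-- animals = ["dog", "cat", "bat", "cock", "cow", "pig", "fox", "ant", "bird", "lion", "wolf", "deer", "bear", "frog",
--            "hen", "mole", "duck", "goat"]
--
-- def is_pattern_in_text(pattern: str, text: str) -> bool:
--     """ Проверяет, можно ли из букв, входящих в text, составить строку pattern.
--
--     Args:
--       pattern: слово, которое нужно составить
--       text: все доступные символы в виде одной строки
--
--     Returns:
--       True если успешно, False в обратном случае.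
--
--     """
--     pattern = Counter(pattern)
--     text = Counter(text)
--     for i in pattern.keys():
--         if pattern[i] > text.get(i, 0):
--             return False
--     return True
--
-- def count_animals(input_line: str) -> int:
--     """ Принимает строку input_line и возвращает максимальное количество названий
--           животных, которое возможно собрать из символов строки.
--
--     Args:
--       input_line: все доступные символы.
--
--     Returns:
--       Количество названий животных из animals, которое возможно собрать из символов строки input_line.
--
--     """
--     possible_words = set()
--     for j in range(3, 5):
--         for i in animals:
--             if is_pattern_in_text(i, input_line):
--                 possible_words.add(i)
--     for i in range(len(input_line) // 3, 0, -1):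
--         for j in combinations_with_replacement(possible_words, i):
--             line = ''.join(j)
--             if is_pattern_in_text(line, input_line):
--                 return i
--     return 0
-- ===== SOURCE B (Python) =====
-- from collections import Counter
--
-- animals = ["dog", "cat", "bat", "cock", "cow", "pig", "fox", "ant", "bird", "lion", "wolf", "deer", "bear", "frog",
--            "hen", "mole", "duck", "goat"]
--
-- def count_animals(input_line: str) -> int:
--     """Branch-and-bound knapsack DFS over word multiplicities with an
--     incremental letter budget, instead of enumerating all combinations of
--     every size."""
--     budget = Counter(input_line)
--     words = [w for w in animals if all(budget[c] >= n for c, n in Counter(w).items())]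
--
--     def best(i, budget):
--         if i == len(words):
--             return 0
--         wcounts = Counter(words[i])
--         m = min(budget[c] // wcounts[c] for c in wcounts)
--         res = 0
--         for t in range(m, -1, -1):
--             rem = Counter({c: v - t * wcounts[c] for c, v in budget.items()})
--             if t + sum(rem.values()) // 3 > res:
--                 res = max(res, t + best(i + 1, rem))
--         return res
--
--     return best(0, budget)
-- ===== Notes on version B (the rewrite author's own statement) =====
-- stated objective: faster
-- what changed: A enumerates every combination-with-replacement of the buildable words at each size from len//3 downward; B runs a branch-and-bound knapsack DFS over per-word multiplicities with an incremental letter budget and a remaining-letters//3 upper-bound prune, returning the maximum directly.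
import Mathlib
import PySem

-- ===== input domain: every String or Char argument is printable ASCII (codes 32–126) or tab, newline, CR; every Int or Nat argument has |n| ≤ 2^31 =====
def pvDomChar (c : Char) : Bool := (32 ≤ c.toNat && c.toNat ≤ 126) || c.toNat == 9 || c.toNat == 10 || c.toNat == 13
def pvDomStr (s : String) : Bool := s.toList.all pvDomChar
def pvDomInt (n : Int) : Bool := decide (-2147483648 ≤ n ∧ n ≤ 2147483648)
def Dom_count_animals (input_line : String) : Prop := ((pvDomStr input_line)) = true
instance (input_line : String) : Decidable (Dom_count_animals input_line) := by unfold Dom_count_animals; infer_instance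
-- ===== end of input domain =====

-- B replaces A's exhaustive enumeration of all word combinations of every size by a
-- branch-and-bound knapsack search over per-word multiplicities (same return value).

-- ===== PORT A =====
def pvAnimals : List String := ["dog", "cat", "bat", "cock", "cow", "pig", "fox", "ant", "bird", "lion", "wolf", "deer", "bear", "frog", "hen", "mole", "duck", "goat"]

def is_pattern_in_text (pattern text : String) : Bool :=
  -- pattern = Counter(pattern); text = Counter(text); for i in pattern.keys(): if pattern[i] > text.get(i,0): return False; return True
  let pc := PySem.Dict.counter pattern.toList
  let tc := PySem.Dict.counter text.toList
  pc.keys.all (fun i => !(pc.getD i 0 > tc.getD i 0))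

-- hand port of itertools.combinations_with_replacement (pool, r) as lists, in CPython's
-- index-lexicographic order; exact for any list pool
def pvCwr (l : List String) (r : Nat) : List (List String) :=
  match r, l with
  | 0, _ => [[]]
  | _ + 1, [] => []
  | r + 1, x :: xs => (pvCwr (x :: xs) r).map (fun c => x :: c) ++ pvCwr xs (r + 1)
termination_by (r, l.length)

-- the 'for i in range(len//3, 0, -1): for j in cwr(...): if fit: return i' loop; 'return 0' at the end.
-- A iterates cwr over the SET possible_words: the returned value does not depend on that
-- iteration order (it is 'any combination of size i fits'), so iterating in insertion order is exact.
def pvLoopA (input_line : String) (pw : List String) : List Int → Int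
  | [] => 0
  | i :: rest =>
      if (pvCwr pw i.toNat).any (fun j => is_pattern_in_text (PySem.Str.join "" j) input_line) then i
      else pvLoopA input_line pw rest

def count_animals (input_line : String) : Int :=
  let pw : PySem.Set String :=
    (PySem.List.pyRange 3 5 1).foldl
      (fun s _j => pvAnimals.foldl (fun s i => if is_pattern_in_text i input_line then PySem.Set.add s i else s) s)
      PySem.Set.empty
  pvLoopA input_line pw (PySem.List.pyRange (PySem.Int.floordiv (PySem.Str.len input_line) 3) 0 (-1))

-- ===== PORT B =====
-- best(i, budget): branch-and-bound over the multiplicity of each word (recursion on the word-list suffix)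
def pvBestB : List String → PySem.Dict Char Int → Int
  | [], _ => 0
  | w :: ws, budget =>
      let wc := PySem.Dict.counter w.toList
      -- min(budget[c] // wcounts[c] for c in wcounts); the generator is nonempty for every word
      -- of `animals`, so the `.getD 0` default is never consulted on reachable calls
      let m := (PySem.List.min? (wc.keys.map (fun c => PySem.Int.floordiv (budget.getD c 0) (wc.getD c 0))) (fun x => x)).getD 0
      (PySem.List.pyRange m (-1) (-1)).foldl
        (fun res t =>
          let rem := budget.items.foldl (fun d p => d.insert p.1 (p.2 - t * wc.getD p.1 0)) PySem.Dict.empty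
          if t + PySem.Int.floordiv rem.values.sum 3 > res then max res (t + pvBestB ws rem) else res)
        0
termination_by ws _ => ws.length
decreasing_by simp

def count_animals_alt (input_line : String) : Int :=
  let budget := PySem.Dict.counter input_line.toList
  let words := pvAnimals.filter (fun w => (PySem.Dict.counter w.toList).items.all (fun p => budget.getD p.1 0 ≥ p.2))
  pvBestB words budget

-- ===== PRECONDITION & SPEC =====
def Spec_count_animals (input_line : String) (out : Int) : Prop := out = count_animals_alt input_line
instance (input_line : String) (out : Int) : Decidable (Spec_count_animals input_line out) := by unfold Spec_count_animals; infer_instance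

-- ===== CLAIM (what is proved, stated in full; the proofs are below) =====
def Claim_equal_count_animals : Prop := ∀ (input_line : String), Dom_count_animals input_line → Spec_count_animals input_line (count_animals input_line)

-- ===== LEMMAS AND PROOFS =====

-- the common mathematical shape of both programs: the best total word count obtainable
-- from a letter budget f, by recursion over the word list with a per-word multiplicity loop
def pvM (f : Char → Int) (w : List Char) : Int :=
  (PySem.List.min? ((PySem.Set.ofList w).map (fun c => PySem.Int.floordiv (f c) ((w.count c : Nat) : Int))) (fun x => x)).getD 0

def SBest : List String → (Char → Int) → Int
  | [], _ => 0
  | w :: ws, f =>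
      (PySem.List.pyRange (pvM f w.toList) (-1) (-1)).foldl
        (fun res t => max res (t + SBest ws (fun c => f c - t * ((w.toList.count c : Nat) : Int)))) 0
termination_by ws _ => ws.length
decreasing_by simp

def FitsF (c : List String) (f : Char → Int) : Prop :=
  ∀ ch : Char, (((c.flatMap String.toList).count ch : Nat) : Int) ≤ f ch

-- pvM facts
theorem pvM_le (f : Char → Int) (w : List Char) (ch : Char) (hch : ch ∈ w) :
    pvM f w ≤ PySem.Int.floordiv (f ch) ((w.count ch : Nat) : Int) := by
  unfold pvM
  have hmem : PySem.Int.floordiv (f ch) ((w.count ch : Nat) : Int) ∈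
      (PySem.Set.ofList w).map (fun c => PySem.Int.floordiv (f c) ((w.count c : Nat) : Int)) :=
    List.mem_map.2 ⟨ch, (PySem.Set.mem_ofList w ch).2 hch, rfl⟩
  cases hmin : PySem.List.min? ((PySem.Set.ofList w).map (fun c => PySem.Int.floordiv (f c) ((w.count c : Nat) : Int))) (fun x => x) with
  | none =>
      rw [PySem.List.min?_eq_none_iff] at hmin
      rw [hmin] at hmem; simp at hmem
  | some v => simpa using PySem.List.min?_isMin hmin _ hmem

theorem le_pvM (f : Char → Int) (w : List Char) (k : Int) (hne : w ≠ [])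
    (h : ∀ ch ∈ w, k * ((w.count ch : Nat) : Int) ≤ f ch) : k ≤ pvM f w := by
  unfold pvM
  cases hmin : PySem.List.min? ((PySem.Set.ofList w).map (fun c => PySem.Int.floordiv (f c) ((w.count c : Nat) : Int))) (fun x => x) with
  | none =>
      rw [PySem.List.min?_eq_none_iff] at hmin
      obtain ⟨ch, hch⟩ := List.exists_mem_of_ne_nil w hne
      have : PySem.Int.floordiv (f ch) ((w.count ch : Nat) : Int) ∈
          (PySem.Set.ofList w).map (fun c => PySem.Int.floordiv (f c) ((w.count c : Nat) : Int)) :=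
        List.mem_map.2 ⟨ch, (PySem.Set.mem_ofList w ch).2 hch, rfl⟩
      rw [hmin] at this; simp at this
  | some v =>
      have hv := PySem.List.min?_mem hmin
      obtain ⟨ch, hch, rfl⟩ := List.mem_map.1 hv
      have hch' := (PySem.Set.mem_ofList _ _).1 hch
      have hcnt : (0 : Int) < ((w.count ch : Nat) : Int) := by exact_mod_cast List.count_pos_iff.2 hch'
      simpa using (PySem.Int.le_floordiv_iff_mul_le hcnt).2 (h ch hch')

theorem pv_t_le (f : Char → Int) (w : List Char) (t : Int) (htm : t ≤ pvM f w) :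
    ∀ ch ∈ w, t * ((w.count ch : Nat) : Int) ≤ f ch := by
  intro ch hch
  have hcnt : (0 : Int) < ((w.count ch : Nat) : Int) := by exact_mod_cast List.count_pos_iff.2 hch
  exact (PySem.Int.le_floordiv_iff_mul_le hcnt).1 (le_trans htm (pvM_le f w ch hch))

-- fold-max helpers
theorem pv_foldl_max_le (g : Int → Int) (l : List Int) (a B : Int) (ha : a ≤ B)
    (h : ∀ t ∈ l, g t ≤ B) : l.foldl (fun r t => max r (g t)) a ≤ B := by
  induction l generalizing a with
  | nil => simpa using ha
  | cons x xs ih =>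
      simp only [List.foldl_cons]
      exact ih (max a (g x)) (max_le ha (h x (by simp))) (fun t ht => h t (by simp [ht]))

theorem pv_foldl_max_attain (g : Int → Int) (l : List Int) (a : Int) :
    l.foldl (fun r t => max r (g t)) a = a ∨ ∃ t ∈ l, l.foldl (fun r t => max r (g t)) a = g t := by
  induction l generalizing a with
  | nil => left; rfl
  | cons x xs ih =>
      simp only [List.foldl_cons]
      rcases ih (max a (g x)) with h | ⟨t, ht, h⟩
      · rcases max_cases a (g x) with ⟨he, _⟩ | ⟨he, _⟩
        · left; rw [h, he]
        · right; exact ⟨x, by simp, by rw [h, he]⟩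
      · right; exact ⟨t, by simp [ht], h⟩

-- sum helpers
theorem pv_sum_ite_one (K : List Char) (a : Char) (hnd : K.Nodup) (ha : a ∈ K) :
    (K.map (fun c => if a = c then (1 : Int) else 0)).sum = 1 := by
  induction K with
  | nil => simp at ha
  | cons x xs ih =>
      simp only [List.map_cons, List.sum_cons]
      rcases List.mem_cons.1 ha with rfl | hmem
      · have hz : (xs.map (fun c => if a = c then (1 : Int) else 0)).sum = 0 := by
          rw [List.map_congr_left (g := fun _ => (0 : Int))
            (fun c hc => if_neg (by rintro rfl; exact (List.nodup_cons.1 hnd).1 hc))]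
          simp
        rw [if_pos rfl, hz]
        norm_num
      · have hne : a ≠ x := by rintro rfl; exact (List.nodup_cons.1 hnd).1 hmem
        rw [if_neg hne, ih (List.nodup_cons.1 hnd).2 hmem]
        ring

theorem pv_sum_count (K : List Char) (w : List Char) (hnd : K.Nodup) (hsub : ∀ ch ∈ w, ch ∈ K) :
    (K.map (fun c => ((w.count c : Nat) : Int))).sum = (w.length : Int) := by
  induction w with
  | nil => simp
  | cons a w' ih =>
      have hcount : ∀ c ∈ K, ((List.count c (a :: w') : Nat) : Int)
          = ((List.count c w' : Nat) : Int) + (if a = c then (1 : Int) else 0) := by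
        intro c _
        rcases eq_or_ne a c with rfl | hne
        · rw [List.count_cons_self, if_pos rfl]
          push_cast
          ring
        · rw [if_neg hne]
          have hcc : List.count c (a :: w') = List.count c w' := by
            simp [hne]
          rw [hcc]
          ring
      rw [List.map_congr_left hcount, PySem.List.sum_map_add_int,
        ih (fun ch hch => hsub ch (List.mem_cons_of_mem _ hch)),
        pv_sum_ite_one K a hnd (hsub a (by simp))]
      rw [List.length_cons]
      push_cast
      ring

theorem pv_sum_map_sub (K : List Char) (f g : Char → Int) :
    (K.map (fun c => f c - g c)).sum = (K.map f).sum - (K.map g).sum := by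
  induction K with
  | nil => simp
  | cons x xs ih => simp only [List.map_cons, List.sum_cons, ih]; ring

theorem pv_sum_map_mul (K : List Char) (t : Int) (g : Char → Int) :
    (K.map (fun c => t * g c)).sum = t * (K.map g).sum := by
  induction K with
  | nil => simp
  | cons x xs ih => simp only [List.map_cons, List.sum_cons, ih]; ring

theorem pv_count_flatMap_replicate (k : Nat) (w : String) (rest : List String) (ch : Char) :
    ((List.replicate k w ++ rest).flatMap String.toList).count ch
      = k * w.toList.count ch + (rest.flatMap String.toList).count ch := by
  induction k with
  | zero => simp
  | succ n ih =>
      simp only [List.replicate_succ, List.cons_append, List.flatMap_cons, List.count_append, ih]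
      ring

-- SBest facts
theorem sb_nonneg (L : List String) (f : Char → Int) : 0 ≤ SBest L f := by
  cases L with
  | nil => simp [SBest]
  | cons w ws => simp only [SBest]; exact (PySem.List.le_foldl_max_int _ _ 0).1

theorem sb_congr : ∀ (L : List String) (f g : Char → Int),
    (∀ ch : Char, (∃ w ∈ L, ch ∈ w.toList) → f ch = g ch) → SBest L f = SBest L g := by
  intro L
  induction L with
  | nil => intro f g _; simp [SBest]
  | cons w ws ih =>
      intro f g h
      have hfw : ∀ ch ∈ w.toList, f ch = g ch := fun ch hch => h ch ⟨w, by simp, hch⟩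
      have hm : pvM f w.toList = pvM g w.toList := by
        unfold pvM
        rw [List.map_congr_left (g := fun c => PySem.Int.floordiv (g c) ((w.toList.count c : Nat) : Int))
          (fun c hc => by rw [hfw c ((PySem.Set.mem_ofList _ _).1 hc)])]
      simp only [SBest, hm]
      refine PySem.List.foldl_congr_mem _ _ _ _ ?_
      intro acc t _
      beta_reduce
      rw [ih (fun c => f c - t * ((w.toList.count c : Nat) : Int))
            (fun c => g c - t * ((w.toList.count c : Nat) : Int))
            (fun ch hex => by
              obtain ⟨w', hw', hch⟩ := hex
              beta_reduce
              rw [h ch ⟨w', List.mem_cons_of_mem _ hw', hch⟩])]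

theorem sb_le_bound (K : List Char) (hnd : K.Nodup) :
    ∀ (L : List String) (f : Char → Int),
      (∀ w ∈ L, ∀ ch ∈ w.toList, ch ∈ K) → (∀ w ∈ L, 3 ≤ w.toList.length) →
      (∀ ch ∈ K, 0 ≤ f ch) → SBest L f ≤ PySem.Int.floordiv ((K.map f).sum) 3 := by
  intro L
  induction L with
  | nil =>
      intro f _ _ hpos
      have hS : 0 ≤ (K.map f).sum :=
        List.sum_nonneg (by intro x hx; obtain ⟨c, hc, rfl⟩ := List.mem_map.1 hx; exact hpos c hc)
      simp only [SBest]
      rw [PySem.Int.floordiv_eq_ediv_of_pos (by norm_num)]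
      exact Int.ediv_nonneg hS (by norm_num)
  | cons w ws ih =>
      intro f hchars hlen hpos
      have hS : 0 ≤ (K.map f).sum :=
        List.sum_nonneg (by intro x hx; obtain ⟨c, hc, rfl⟩ := List.mem_map.1 hx; exact hpos c hc)
      simp only [SBest]
      apply pv_foldl_max_le
      · rw [PySem.Int.floordiv_eq_ediv_of_pos (by norm_num)]
        exact Int.ediv_nonneg hS (by norm_num)
      · intro t ht
        rw [PySem.List.mem_pyRange_neg_one] at ht
        have ht0 : 0 ≤ t := by omega
        have hcnt := pv_t_le f w.toList t ht.2
        have hpos' : ∀ ch ∈ K, 0 ≤ f ch - t * ((w.toList.count ch : Nat) : Int) := by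
          intro ch hchK
          by_cases hcw : ch ∈ w.toList
          · have := hcnt ch hcw; linarith
          · simp [List.count_eq_zero.2 hcw]; exact hpos ch hchK
        have hrec := ih (fun c => f c - t * ((w.toList.count c : Nat) : Int))
          (fun w' hw' ch hch => hchars w' (List.mem_cons_of_mem _ hw') ch hch)
          (fun w' hw' => hlen w' (List.mem_cons_of_mem _ hw'))
          hpos'
        have hsum : (K.map (fun c => f c - t * ((w.toList.count c : Nat) : Int))).sum
            = (K.map f).sum - t * (w.toList.length : Int) := by
          rw [pv_sum_map_sub K f (fun c => t * ((w.toList.count c : Nat) : Int)),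
            pv_sum_map_mul K t (fun c => ((w.toList.count c : Nat) : Int)),
            pv_sum_count K w.toList hnd (hchars w (by simp) )]
        have hlen3 : (3 : Int) ≤ (w.toList.length : Int) := by
          exact_mod_cast hlen w (by simp)
        have hmono : PySem.Int.floordiv ((K.map f).sum - t * (w.toList.length : Int)) 3
            ≤ PySem.Int.floordiv ((K.map f).sum - 3 * t) 3 := by
          rw [PySem.Int.floordiv_eq_ediv_of_pos (by norm_num),
            PySem.Int.floordiv_eq_ediv_of_pos (by norm_num)]
          apply Int.ediv_le_ediv (by norm_num)
          have := mul_le_mul_of_nonneg_left hlen3 ht0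
          linarith
        have hshift : PySem.Int.floordiv ((K.map f).sum - 3 * t) 3
            = PySem.Int.floordiv ((K.map f).sum) 3 - t := by
          rw [PySem.Int.floordiv_eq_ediv_of_pos (by norm_num),
            PySem.Int.floordiv_eq_ediv_of_pos (by norm_num)]
          have h1 : (K.map f).sum - 3 * t = (K.map f).sum + (-t) * 3 := by ring
          rw [h1, Int.add_mul_ediv_right _ _ (by norm_num)]
          ring
        have := hrec
        rw [hsum] at this
        linarith

theorem sb_ge : ∀ (L : List String) (f : Char → Int) (c : List String),
    (∀ x ∈ c, x ∈ L) → (∀ x ∈ L, x.toList ≠ []) → FitsF c f →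
    ((c.length : Nat) : Int) ≤ SBest L f := by
  intro L
  induction L with
  | nil =>
      intro f c hmem _ _
      have : c = [] := List.eq_nil_iff_forall_not_mem.2 (fun x hx => List.not_mem_nil (hmem x hx))
      subst this; simp [SBest]
  | cons w ws ih =>
      intro f c hmem hne hfit
      have hperm : (List.replicate (c.count w) w ++ c.filter (fun x => !(x == w))).Perm c := by
        have h := List.filter_append_perm (fun x => x == w) c
        rwa [List.filter_beq] at h
      have hcount : ∀ ch, (c.flatMap String.toList).count ch
          = c.count w * w.toList.count ch + ((c.filter (fun x => !(x == w))).flatMap String.toList).count ch := by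
        intro ch
        rw [← List.Perm.count_eq (hperm.flatMap (fun a _ => List.Perm.refl _))]
        exact pv_count_flatMap_replicate (c.count w) w _ ch
      have hwne : w.toList ≠ [] := hne w (by simp)
      have hkM : ((c.count w : Nat) : Int) ≤ pvM f w.toList := by
        apply le_pvM f w.toList _ hwne
        intro ch hch
        have h1 := hfit ch
        have h2 : c.count w * w.toList.count ch ≤ (c.flatMap String.toList).count ch := by
          rw [hcount ch]; exact Nat.le_add_right _ _
        have h3 : ((c.count w * w.toList.count ch : Nat) : Int) ≤ f ch := le_trans (by exact_mod_cast h2) h1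
        push_cast at h3 ⊢
        exact h3
      have hmem' : ∀ x ∈ c.filter (fun x => !(x == w)), x ∈ ws := by
        intro x hx
        have hxc := List.mem_of_mem_filter hx
        have hxw : x ≠ w := by have := List.of_mem_filter hx; simpa using this
        rcases List.mem_cons.1 (hmem x hxc) with rfl | h
        · exact absurd rfl hxw
        · exact h
      have hfitrest : FitsF (c.filter (fun x => !(x == w)))
          (fun ch => f ch - ((c.count w : Nat) : Int) * ((w.toList.count ch : Nat) : Int)) := by
        intro ch
        have h1 := hfit ch
        have h2 := hcount ch
        rw [h2] at h1
        push_cast at h1 ⊢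
        linarith
      have hrec := ih _ _ hmem' (fun x hx => hne x (List.mem_cons_of_mem _ hx)) hfitrest
      have hkmem : ((c.count w : Nat) : Int) ∈ PySem.List.pyRange (pvM f w.toList) (-1) (-1) :=
        PySem.List.mem_pyRange_neg_one.2 ⟨by omega, hkM⟩
      have hge := (PySem.List.le_foldl_max_int (PySem.List.pyRange (pvM f w.toList) (-1) (-1))
        (fun t => t + SBest ws (fun ch => f ch - t * ((w.toList.count ch : Nat) : Int))) 0).2 _ hkmem
      have hlenc : c.length = c.count w + (c.filter (fun x => !(x == w))).length := by
        have h := hperm.length_eq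
        simpa using h.symm
      simp only [SBest]
      calc ((c.length : Nat) : Int)
          = ((c.count w : Nat) : Int) + (((c.filter (fun x => !(x == w))).length : Nat) : Int) := by
            rw [hlenc]; push_cast; ring
        _ ≤ ((c.count w : Nat) : Int) + SBest ws (fun ch => f ch - ((c.count w : Nat) : Int) * ((w.toList.count ch : Nat) : Int)) := by
            linarith
        _ ≤ _ := hge

theorem sb_exists : ∀ (L : List String) (f : Char → Int), (∀ ch : Char, 0 ≤ f ch) →
    ∃ c : List String, (∀ x ∈ c, x ∈ L) ∧ ((c.length : Nat) : Int) = SBest L f ∧ FitsF c f := by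
  intro L
  induction L with
  | nil =>
      intro f hpos
      exact ⟨[], by simp, by simp [SBest], fun ch => by simpa using hpos ch⟩
  | cons w ws ih =>
      intro f hpos
      simp only [SBest]
      rcases pv_foldl_max_attain
        (fun t => t + SBest ws (fun c => f c - t * ((w.toList.count c : Nat) : Int)))
        (PySem.List.pyRange (pvM f w.toList) (-1) (-1)) 0 with h0 | ⟨t, ht, heq⟩
      · exact ⟨[], by simp, by simp [h0], fun ch => by simpa using hpos ch⟩
      · rw [PySem.List.mem_pyRange_neg_one] at ht
        have ht0 : 0 ≤ t := by omega
        have hcnt := pv_t_le f w.toList t ht.2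
        have hpos' : ∀ ch, 0 ≤ f ch - t * ((w.toList.count ch : Nat) : Int) := by
          intro ch
          by_cases hch : ch ∈ w.toList
          · have := hcnt ch hch; linarith
          · simp [List.count_eq_zero.2 hch]; exact hpos ch
        obtain ⟨c', hc'mem, hc'len, hc'fit⟩ := ih _ hpos'
        refine ⟨List.replicate t.toNat w ++ c', ?_, ?_, ?_⟩
        · intro x hx
          rcases List.mem_append.1 hx with h | h
          · rw [List.eq_of_mem_replicate h]; exact (by simp)
          · exact List.mem_cons_of_mem _ (hc'mem x h)
        · rw [heq]
          simp only [List.length_append, List.length_replicate]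
          push_cast
          rw [Int.toNat_of_nonneg ht0, hc'len]
        · intro ch
          have h1 := hc'fit ch
          have h2 := pv_count_flatMap_replicate t.toNat w c' ch
          rw [h2]
          push_cast
          rw [Int.toNat_of_nonneg ht0]
          push_cast at h1
          linarith

-- cwr characterization
theorem cwr_mem_elems_aux : ∀ (n r : Nat) (l : List String) (c : List String), r + l.length ≤ n →
    c ∈ pvCwr l r → c.length = r ∧ ∀ x ∈ c, x ∈ l := by
  intro n
  induction n with
  | zero =>
      intro r l c hle hc
      have hr : r = 0 := by omega
      subst hr
      simp only [pvCwr] at hc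
      simp at hc; subst hc; simp
  | succ n ih =>
      intro r l c hle hc
      match r, l with
      | 0, l =>
          simp only [pvCwr] at hc
          simp at hc; subst hc; simp
      | r + 1, [] => simp only [pvCwr] at hc; simp at hc
      | r + 1, x :: xs =>
          simp only [pvCwr] at hc
          rcases List.mem_append.1 hc with h | h
          · obtain ⟨c', hc', rfl⟩ := List.mem_map.1 h
            have hi := ih r (x :: xs) c' (by simp at hle ⊢; omega) hc'
            refine ⟨by simp [hi.1], ?_⟩
            intro y hy
            rcases List.mem_cons.1 hy with rfl | hy'
            · simp
            · exact hi.2 y hy'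
          · have hi := ih (r + 1) xs c (by simp at hle ⊢; omega) h
            exact ⟨hi.1, fun y hy => List.mem_cons_of_mem _ (hi.2 y hy)⟩

theorem cwr_mem_elems {l : List String} {r : Nat} {c : List String} (h : c ∈ pvCwr l r) :
    c.length = r ∧ ∀ x ∈ c, x ∈ l :=
  cwr_mem_elems_aux (r + l.length) r l c le_rfl h

theorem cwr_subset_cons (r : Nat) (x : String) (xs : List String) (c : List String)
    (h : c ∈ pvCwr xs r) : c ∈ pvCwr (x :: xs) r := by
  cases r with
  | zero => simpa [pvCwr] using h
  | succ r =>
      simp only [pvCwr]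
      exact List.mem_append.2 (Or.inr h)

theorem cwr_replicate_append : ∀ (k : Nat) (x : String) (xs : List String) (r : Nat) (c' : List String),
    c' ∈ pvCwr xs r → (List.replicate k x ++ c') ∈ pvCwr (x :: xs) (k + r) := by
  intro k
  induction k with
  | zero => intro x xs r c' h; simpa using cwr_subset_cons r x xs c' h
  | succ k ih =>
      intro x xs r c' h
      have he : k + 1 + r = (k + r) + 1 := by omega
      rw [he]
      show (List.replicate (k + 1) x ++ c') ∈ pvCwr (x :: xs) ((k + r) + 1)
      simp only [pvCwr]
      apply List.mem_append.2
      left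
      apply List.mem_map.2
      exact ⟨List.replicate k x ++ c', ih x xs r c' h, by simp [List.replicate_succ]⟩

theorem cwr_exists : ∀ (l : List String) (c : List String), (∀ x ∈ c, x ∈ l) →
    ∃ c' ∈ pvCwr l c.length, c'.Perm c := by
  intro l
  induction l with
  | nil =>
      intro c h
      have : c = [] := List.eq_nil_iff_forall_not_mem.2 (fun x hx => List.not_mem_nil (h x hx))
      subst this
      exact ⟨[], by simp [pvCwr], List.Perm.refl _⟩
  | cons x xs ih =>
      intro c hmem
      have hperm : (List.replicate (c.count x) x ++ c.filter (fun y => !(y == x))).Perm c := by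
        have h := List.filter_append_perm (fun y => y == x) c
        rwa [List.filter_beq] at h
      have hrmem : ∀ y ∈ c.filter (fun y => !(y == x)), y ∈ xs := by
        intro y hy
        have hyc := List.mem_of_mem_filter hy
        have hyx : y ≠ x := by have := List.of_mem_filter hy; simpa using this
        rcases List.mem_cons.1 (hmem y hyc) with rfl | h
        · exact absurd rfl hyx
        · exact h
      obtain ⟨c'', hc'', hp⟩ := ih _ hrmem
      refine ⟨List.replicate (c.count x) x ++ c'', ?_, ?_⟩
      · have h := cwr_replicate_append (c.count x) x xs _ c'' hc''
        have hl : c.count x + (c.filter (fun y => !(y == x))).length = c.length := by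
          have := hperm.length_eq
          simpa using this
        rwa [hl] at h
      · exact (List.Perm.append_left _ hp).trans hperm

-- A's fit test counts letters
theorem fit_iff (p t : String) :
    is_pattern_in_text p t = true ↔ ∀ ch : Char, p.toList.count ch ≤ t.toList.count ch := by
  unfold is_pattern_in_text
  simp only [List.all_eq_true, PySem.Dict.keys_counter, PySem.Dict.getD_counter]
  constructor
  · intro h ch
    by_cases hch : ch ∈ p.toList
    · have := h ch ((PySem.Set.mem_ofList _ _).2 hch)
      simp only [Bool.not_eq_eq_eq_not, Bool.not_true, decide_eq_false_iff_not, not_lt] at this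
      exact_mod_cast this
    · simp [List.count_eq_zero.2 hch]
  · intro h ch _
    simp only [Bool.not_eq_eq_eq_not, Bool.not_true, decide_eq_false_iff_not, not_lt]
    exact_mod_cast h ch

-- ''.join on char lists is flatten
theorem pv_join_nil_flatten : ∀ (parts : List (List Char)), PySem.Chars.join [] parts = parts.flatten := by
  intro parts
  induction parts with
  | nil => simp [PySem.Chars.join_nil]
  | cons cs rest ih =>
      cases rest with
      | nil => simp [PySem.Chars.join_singleton]
      | cons ds rest' =>
          rw [PySem.Chars.join_cons_cons]
          simp only [List.flatten_cons]
          rw [ih]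
          simp

theorem pv_join_count (j : List String) (ch : Char) :
    (PySem.Str.join "" j).toList.count ch = (j.flatMap String.toList).count ch := by
  rw [PySem.Str.toList_join]
  have : ("" : String).toList = [] := rfl
  rw [this, pv_join_nil_flatten, List.flatMap_def]

-- possible_words is the fit-filtered animals list
theorem pv_pass1 : ∀ (xs : List String) (s : PySem.Set String) (p : String → Bool),
    (∀ i ∈ xs, i ∉ s) → xs.Nodup →
    xs.foldl (fun s i => if p i then PySem.Set.add s i else s) s = s ++ xs.filter p := by
  intro xs
  induction xs with
  | nil => intro s p _ _; simp
  | cons x xs ih =>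
      intro s p hnotin hnd
      simp only [List.foldl_cons, List.filter_cons]
      by_cases hp : p x
      · rw [if_pos hp]
        have haddeq : PySem.Set.add s x = s ++ [x] := by
          simp [PySem.Set.add, hnotin x (by simp)]
        rw [haddeq, ih (s ++ [x]) p ?_ (List.nodup_cons.1 hnd).2]
        · simp [hp]
        · intro i hi
          simp only [List.mem_append, List.mem_singleton]
          exact not_or.2 ⟨hnotin i (by simp [hi]), fun he => (List.nodup_cons.1 hnd).1 (he ▸ hi)⟩
      · rw [if_neg hp, ih s p (fun i hi => hnotin i (by simp [hi])) (List.nodup_cons.1 hnd).2]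
        simp [hp]

theorem pv_pass2 : ∀ (xs : List String) (s : PySem.Set String) (p : String → Bool),
    (∀ i ∈ xs, p i = true → i ∈ s) →
    xs.foldl (fun s i => if p i then PySem.Set.add s i else s) s = s := by
  intro xs
  induction xs with
  | nil => intro s p _; rfl
  | cons x xs ih =>
      intro s p hin
      simp only [List.foldl_cons]
      by_cases hp : p x
      · rw [if_pos hp]
        have : PySem.Set.add s x = s := by simp [PySem.Set.add, hin x (by simp) hp]
        rw [this]
        exact ih s p (fun i hi hpi => hin i (by simp [hi]) hpi)
      · rw [if_neg hp]
        exact ih s p (fun i hi hpi => hin i (by simp [hi]) hpi)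

theorem pw_eq (input : String) :
    ((PySem.List.pyRange 3 5 1).foldl
      (fun s _j => pvAnimals.foldl (fun s i => if is_pattern_in_text i input then PySem.Set.add s i else s) s)
      PySem.Set.empty)
      = pvAnimals.filter (fun w => is_pattern_in_text w input) := by
  have hr : PySem.List.pyRange 3 5 1 = [3, 4] := by decide
  rw [hr]
  simp only [List.foldl_cons, List.foldl_nil]
  rw [pv_pass1 pvAnimals PySem.Set.empty _ (by intro i _; simp [PySem.Set.empty]) (by decide)]
  have he : (PySem.Set.empty : PySem.Set String) ++ pvAnimals.filter (fun w => is_pattern_in_text w input)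
      = pvAnimals.filter (fun w => is_pattern_in_text w input) := rfl
  rw [he]
  exact pv_pass2 pvAnimals _ _ (fun i hi hpi => List.mem_filter.2 ⟨hi, hpi⟩)

-- lookups in the rebuilt budget dict
theorem pv_get?_map (l : List (Char × Int)) (t : Int) (cnt : Char → Int) (c : Char) :
    (PySem.Dict.mk (l.map (fun p => (p.1, p.2 - t * cnt p.1)))).get? c
      = ((PySem.Dict.mk l).get? c).map (fun v => v - t * cnt c) := by
  induction l with
  | nil => rfl
  | cons p ps ih =>
      rw [List.map_cons, PySem.Dict.get?_mk_cons, PySem.Dict.get?_mk_cons]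
      by_cases h : p.1 == c
      · have hc : p.1 = c := eq_of_beq h
        subst hc
        simp
      · have hne : p.1 ≠ c := fun he => h (by simp [he])
        simp [hne, ih]

-- B's recursion computes SBest
theorem bestB_eq : ∀ (ws : List String) (d : PySem.Dict Char Int),
    d.keys.Nodup → (∀ w ∈ ws, ∀ ch ∈ w.toList, ch ∈ d.keys) → (∀ w ∈ ws, 3 ≤ w.toList.length) →
    (∀ ch : Char, 0 ≤ d.getD ch 0) →
    pvBestB ws d = SBest ws (fun ch => d.getD ch 0) := by
  intro ws
  induction ws with
  | nil => intro d _ _ _ _; simp [pvBestB, SBest]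
  | cons w ws ih =>
      intro d hnd hchars hlen hpos
      simp only [pvBestB, SBest]
      have hm : ((PySem.List.min? ((PySem.Dict.counter w.toList).keys.map
            (fun c => PySem.Int.floordiv (d.getD c 0) ((PySem.Dict.counter w.toList).getD c 0))) (fun x => x)).getD 0)
          = pvM (fun ch => d.getD ch 0) w.toList := by
        unfold pvM
        rw [PySem.Dict.keys_counter,
          List.map_congr_left (g := fun c => PySem.Int.floordiv (d.getD c 0) ((w.toList.count c : Nat) : Int))
            (fun c _ => by rw [PySem.Dict.getD_counter])]
      rw [hm]
      have aux : ∀ (Lr : List Int), (∀ t ∈ Lr, 0 ≤ t ∧ t ≤ pvM (fun ch => d.getD ch 0) w.toList) →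
          ∀ res : Int, 0 ≤ res →
          Lr.foldl (fun res t =>
            if t + PySem.Int.floordiv (d.items.foldl (fun d' (p : Char × Int) =>
                  d'.insert p.1 (p.2 - t * (PySem.Dict.counter w.toList).getD p.1 0)) PySem.Dict.empty).values.sum 3 > res
            then max res (t + pvBestB ws (d.items.foldl (fun d' (p : Char × Int) =>
                  d'.insert p.1 (p.2 - t * (PySem.Dict.counter w.toList).getD p.1 0)) PySem.Dict.empty))
            else res) res
          = Lr.foldl (fun res t =>
              max res (t + SBest ws (fun c => d.getD c 0 - t * ((w.toList.count c : Nat) : Int)))) res := by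
        intro Lr
        induction Lr with
        | nil => intro _ res _; rfl
        | cons t Ltl ihL =>
            intro hmemL res hres
            obtain ⟨ht0, htm⟩ := hmemL t (by simp)
            simp only [List.foldl_cons]
            set rem := d.items.foldl (fun d' (p : Char × Int) =>
              d'.insert p.1 (p.2 - t * (PySem.Dict.counter w.toList).getD p.1 0)) PySem.Dict.empty with hremdef
            have hndk : (d.items.map (fun p : Char × Int => p.1)).Nodup := hnd
            have hitems := PySem.Dict.items_foldl_insert_fresh d.items (fun p : Char × Int => p.1)
              (fun p : Char × Int => p.2 - t * (PySem.Dict.counter w.toList).getD p.1 0) PySem.Dict.empty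
              (fun a _ => rfl) hndk
            have hremitems : rem.items = d.items.map (fun p => (p.1, p.2 - t * ((w.toList.count p.1 : Nat) : Int))) := by
              rw [hremdef]
              beta_reduce at hitems
              rw [hitems]
              rw [show (PySem.Dict.empty : PySem.Dict Char Int).items = [] from rfl, List.nil_append]
              exact List.map_congr_left (fun p _ => by rw [PySem.Dict.getD_counter])
            have hrem_eq : rem = PySem.Dict.mk (d.items.map (fun p => (p.1, p.2 - t * ((w.toList.count p.1 : Nat) : Int)))) :=
              PySem.Dict.ext hremitems
            have hget : ∀ c : Char, rem.getD c 0
                = if c ∈ d.keys then d.getD c 0 - t * ((w.toList.count c : Nat) : Int) else 0 := by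
              intro c
              have h1 : rem.getD c 0 = (rem.get? c).getD 0 := rfl
              rw [h1, hrem_eq, pv_get?_map d.items t (fun c => ((w.toList.count c : Nat) : Int)) c]
              by_cases hc : c ∈ d.keys
              · rw [if_pos hc]
                cases hgc : (PySem.Dict.mk d.items).get? c with
                | none =>
                    have : d.get? c = none := hgc
                    rw [PySem.Dict.get?_eq_none_iff_not_mem_keys] at this
                    exact absurd hc this
                | some v =>
                    have hdg : d.getD c 0 = v := by
                      show (d.get? c).getD 0 = v
                      rw [show d.get? c = some v from hgc]
                      rfl
                    simp [hdg]
              · rw [if_neg hc]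
                have : d.get? c = none := (PySem.Dict.get?_eq_none_iff_not_mem_keys d c).2 hc
                rw [show (PySem.Dict.mk d.items).get? c = none from this]
                rfl
            have hremkeys : rem.keys = d.keys := by
              rw [hrem_eq]
              show (d.items.map (fun p => (p.1, p.2 - t * ((w.toList.count p.1 : Nat) : Int)))).map Prod.fst = d.items.map Prod.fst
              rw [List.map_map]
              rfl
            have hcnt := pv_t_le (fun ch => d.getD ch 0) w.toList t htm
            have hrempos : ∀ ch : Char, 0 ≤ rem.getD ch 0 := by
              intro ch
              rw [hget ch]
              split_ifs with hc
              · by_cases hcw : ch ∈ w.toList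
                · have := hcnt ch hcw; linarith
                · simp [List.count_eq_zero.2 hcw]; exact hpos ch
              · exact le_refl 0
            have hrec : pvBestB ws rem = SBest ws (fun ch => rem.getD ch 0) :=
              ih rem (by rw [hremkeys]; exact hnd)
                (fun w' hw' ch hch => by rw [hremkeys]; exact hchars w' (List.mem_cons_of_mem _ hw') ch hch)
                (fun w' hw' => hlen w' (List.mem_cons_of_mem _ hw'))
                hrempos
            have hsb : SBest ws (fun ch => rem.getD ch 0)
                = SBest ws (fun c => d.getD c 0 - t * ((w.toList.count c : Nat) : Int)) := by
              apply sb_congr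
              intro ch hex
              obtain ⟨w', hw', hch⟩ := hex
              rw [hget ch, if_pos (hchars w' (List.mem_cons_of_mem _ hw') ch hch)]
            have hbound : SBest ws (fun ch => rem.getD ch 0) ≤ PySem.Int.floordiv rem.values.sum 3 := by
              have hb := sb_le_bound rem.keys (by rw [hremkeys]; exact hnd) ws (fun ch => rem.getD ch 0)
                (fun w' hw' ch hch => by
                  rw [hremkeys]
                  exact hchars w' (List.mem_cons_of_mem _ hw') ch hch)
                (fun w' hw' => hlen w' (List.mem_cons_of_mem _ hw'))
                (fun ch _ => hrempos ch)
              rw [PySem.Dict.values_eq_map_keys rem (by rw [hremkeys]; exact hnd) 0]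
              exact hb
            split_ifs with hcond
            · rw [hrec, hsb]
              exact ihL (fun t' ht' => hmemL t' (by simp [ht'])) _
                (le_trans hres (le_max_left _ _))
            · rw [not_lt] at hcond
              have hle : t + SBest ws (fun c => d.getD c 0 - t * ((w.toList.count c : Nat) : Int)) ≤ res := by
                rw [← hsb]
                linarith [hbound]
              rw [show max res (t + SBest ws (fun c => d.getD c 0 - t * ((w.toList.count c : Nat) : Int))) = res
                from max_eq_left hle]
              exact ihL (fun t' ht' => hmemL t' (by simp [ht'])) res hres
      exact aux _ (fun t ht => by
        rw [PySem.List.mem_pyRange_neg_one] at ht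
        exact ⟨by omega, ht.2⟩) 0 le_rfl

-- length bounds for the loop start
theorem pv_three_le_sum (c : List String) (h : ∀ x ∈ c, 3 ≤ x.toList.length) :
    3 * (c.length : Int) ≤ ((c.flatMap String.toList).length : Int) := by
  induction c with
  | nil => simp
  | cons x xs ih =>
      simp only [List.flatMap_cons, List.length_append, List.length_cons]
      have h1 := h x (by simp)
      have h2 := ih (fun y hy => h y (by simp [hy]))
      push_cast at h2 ⊢
      have h3 : (3 : Int) ≤ (x.toList.length : Int) := by exact_mod_cast h1
      linarith

theorem pv_flat_le_input (c : List String) (inp : List Char)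
    (h : ∀ ch : Char, (c.flatMap String.toList).count ch ≤ inp.count ch) :
    (c.flatMap String.toList).length ≤ inp.length := by
  have hle : ((c.flatMap String.toList : List Char) : Multiset Char) ≤ (inp : Multiset Char) := by
    rw [Multiset.le_iff_count]
    intro a
    simpa using h a
  simpa using Multiset.card_le_card hle

-- proof-side names for the common word list and letter budget
def pvL (input : String) : List String := pvAnimals.filter (fun w => is_pattern_in_text w input)
def pvF0 (input : String) : Char → Int := fun ch => ((input.toList.count ch : Nat) : Int)

theorem pv_hB (input : String) : count_animals_alt input = SBest (pvL input) (pvF0 input) := by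
  have hBpred : ∀ w ∈ pvAnimals,
      ((PySem.Dict.counter w.toList).items.all
        (fun q => decide ((PySem.Dict.counter input.toList).getD q.1 0 ≥ q.2)))
      = is_pattern_in_text w input := by
    intro w _
    rw [Bool.eq_iff_iff, fit_iff]
    simp only [List.all_eq_true, PySem.Dict.items_counter, decide_eq_true_eq]
    constructor
    · intro h ch
      by_cases hch : ch ∈ w.toList
      · have hm : (ch, ((w.toList.count ch : Nat) : Int)) ∈
            (PySem.Set.ofList w.toList).map (fun k => (k, ((w.toList.count k : Nat) : Int))) :=
          List.mem_map.2 ⟨ch, (PySem.Set.mem_ofList _ _).2 hch, rfl⟩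
        have h2 := h _ hm
        rw [PySem.Dict.getD_counter] at h2
        have h3 : ((input.toList.count ch : Nat) : Int) ≥ ((w.toList.count ch : Nat) : Int) := h2
        exact_mod_cast h3
      · simp [List.count_eq_zero.2 hch]
    · intro h q hq
      obtain ⟨ch, _, rfl⟩ := List.mem_map.1 hq
      rw [PySem.Dict.getD_counter]
      show ((input.toList.count ch : Nat) : Int) ≥ ((w.toList.count ch : Nat) : Int)
      exact_mod_cast h ch
  have hchars : ∀ w ∈ pvL input, ∀ ch ∈ w.toList, ch ∈ (PySem.Dict.counter input.toList).keys := by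
    intro w hw ch hch
    have hp := List.of_mem_filter hw
    have hcount := (fit_iff w input).1 hp ch
    have h1 : 0 < w.toList.count ch := List.count_pos_iff.2 hch
    have h2 : 0 < input.toList.count ch := by omega
    rw [PySem.Dict.keys_counter]
    exact (PySem.Set.mem_ofList _ _).2 (List.count_pos_iff.1 h2)
  have hlens : ∀ w ∈ pvL input, 3 ≤ w.toList.length := by
    intro w hw
    have : ∀ w ∈ pvAnimals, 3 ≤ w.toList.length := by decide
    exact this w (List.mem_of_mem_filter hw)
  have hposd : ∀ ch : Char, 0 ≤ (PySem.Dict.counter input.toList).getD ch 0 := by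
    intro ch
    rw [PySem.Dict.getD_counter]
    exact Int.natCast_nonneg _
  simp only [count_animals_alt]
  rw [List.filter_congr hBpred]
  rw [show (List.filter (fun x => is_pattern_in_text x input) pvAnimals) = pvL input from rfl]
  rw [bestB_eq (pvL input) (PySem.Dict.counter input.toList)
    (PySem.Dict.nodup_keys_counter _) hchars hlens hposd]
  have : (fun ch => (PySem.Dict.counter input.toList).getD ch 0) = pvF0 input :=
    funext fun ch => PySem.Dict.getD_counter _ _
  rw [this]

theorem pv_hA (input : String) : count_animals input = SBest (pvL input) (pvF0 input) := by
  have hne : ∀ x ∈ pvL input, x.toList ≠ [] := by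
    intro x hx
    have : ∀ w ∈ pvAnimals, w.toList ≠ [] := by decide
    exact this x (List.mem_of_mem_filter hx)
  have hlen3 : ∀ w ∈ pvL input, 3 ≤ w.toList.length := by
    intro w hw
    have : ∀ w ∈ pvAnimals, 3 ≤ w.toList.length := by decide
    exact this w (List.mem_of_mem_filter hw)
  have hpos : ∀ ch : Char, 0 ≤ pvF0 input ch := fun ch => Int.natCast_nonneg _
  have hQ : ∀ i : Int, 1 ≤ i →
      (((pvCwr (pvL input) i.toNat).any (fun j => is_pattern_in_text (PySem.Str.join "" j) input)) = true
        ↔ i ≤ SBest (pvL input) (pvF0 input)) := by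
    intro i hi
    constructor
    · intro h
      obtain ⟨j, hjmem, hjfit⟩ := List.any_eq_true.1 h
      obtain ⟨hjlen, hjel⟩ := cwr_mem_elems hjmem
      have hfits : FitsF j (pvF0 input) := by
        intro ch
        have hc := (fit_iff _ _).1 hjfit ch
        rw [pv_join_count] at hc
        simp only [pvF0]
        exact_mod_cast hc
      have hge := sb_ge (pvL input) (pvF0 input) j hjel hne hfits
      rw [hjlen] at hge
      omega
    · intro hle
      obtain ⟨c, hcmem, hclen, hcfit⟩ := sb_exists (pvL input) (pvF0 input) hpos
      have hige : i.toNat ≤ c.length := by omega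
      have hc2len : (c.take i.toNat).length = i.toNat := by
        simp only [List.length_take]
        omega
      have hc2mem : ∀ x ∈ c.take i.toNat, x ∈ pvL input := fun x hx => hcmem x (List.mem_of_mem_take hx)
      have hc2fit : FitsF (c.take i.toNat) (pvF0 input) := by
        intro ch
        have hsub : ((c.take i.toNat).flatMap String.toList).Sublist (c.flatMap String.toList) :=
          (List.take_sublist _ _).flatMap _
        exact le_trans (by exact_mod_cast hsub.count_le ch) (hcfit ch)
      obtain ⟨c', hc'mem, hc'perm⟩ := cwr_exists (pvL input) (c.take i.toNat) hc2mem
      rw [hc2len] at hc'mem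
      apply List.any_eq_true.2
      refine ⟨c', hc'mem, ?_⟩
      apply (fit_iff _ _).2
      intro ch
      rw [pv_join_count]
      have hcc : (c'.flatMap String.toList).count ch = ((c.take i.toNat).flatMap String.toList).count ch :=
        (hc'perm.flatMap (fun a _ => List.Perm.refl _)).count_eq ch
      rw [hcc]
      have hfin := hc2fit ch
      simp only [pvF0] at hfin
      exact_mod_cast hfin
  have hG0 := sb_nonneg (pvL input) (pvF0 input)
  have hloop : ∀ n : Nat, SBest (pvL input) (pvF0 input) ≤ (n : Int) →
      pvLoopA input (pvL input) (PySem.List.pyRange (n : Int) 0 (-1)) = SBest (pvL input) (pvF0 input) := by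
    intro n
    induction n with
    | zero =>
        intro h
        rw [show ((0 : Nat) : Int) = 0 from rfl, PySem.List.pyRange_neg_one_eq_nil (by norm_num)]
        simp only [pvLoopA]
        omega
    | succ n ihn =>
        intro h
        rw [show ((n + 1 : Nat) : Int) = (n : Int) + 1 by push_cast; ring]
        rw [PySem.List.pyRange_neg_one_cons (by omega)]
        rw [show (n : Int) + 1 - 1 = (n : Int) by ring]
        simp only [pvLoopA]
        by_cases hcase : ((n : Int) + 1) ≤ SBest (pvL input) (pvF0 input)
        · rw [if_pos ((hQ ((n : Int) + 1) (by omega)).2 hcase)]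
          omega
        · rw [if_neg ?_]
          · exact ihn (by omega)
          · intro hcontra
            exact hcase ((hQ ((n : Int) + 1) (by omega)).1 hcontra)
  have hGk : SBest (pvL input) (pvF0 input) ≤ ((input.toList.length / 3 : Nat) : Int) := by
    obtain ⟨c, hcmem, hclen, hcfit⟩ := sb_exists (pvL input) (pvF0 input) hpos
    have h3 : 3 * (c.length : Int) ≤ ((c.flatMap String.toList).length : Int) :=
      pv_three_le_sum c (fun x hx => hlen3 x (hcmem x hx))
    have h4 : (c.flatMap String.toList).length ≤ input.toList.length := by
      apply pv_flat_le_input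
      intro ch
      have hfin := hcfit ch
      simp only [pvF0] at hfin
      exact_mod_cast hfin
    have h5 : c.length ≤ input.toList.length / 3 := by
      rw [Nat.le_div_iff_mul_le (by norm_num)]
      have : 3 * c.length ≤ input.toList.length := by
        have h6 : 3 * (c.length : Int) ≤ (input.toList.length : Int) := le_trans h3 (by exact_mod_cast h4)
        exact_mod_cast h6
      omega
    omega
  simp only [count_animals]
  rw [pw_eq input]
  rw [PySem.Str.len_eq]
  rw [show (3 : Int) = ((3 : Nat) : Int) from rfl]
  rw [PySem.Int.floordiv_natCast]
  exact hloop (input.toList.length / 3) hGk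

-- ===== VERDICT (by name: the statement is the Claim_ definition above) =====
theorem count_animals_spec : Claim_equal_count_animals := by
  intro input_line _
  unfold Spec_count_animals
  rw [pv_hA input_line, pv_hB input_line]
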